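-- pv_equiv track=rewrite | github.com/traskcs99/Hangman | main.py | find_max_letter_count
-- ===== SOURCE A (Python) =====
-- def find_max_letter_count(analysis_dict):
--     letters = analysis_dict['letters']
--     key_max = max(letters.keys(), key=(lambda k: letters[k]['count']))
--     maxList = [
--         x for x in list(letters.keys())
--         if letters[x]['count'] == letters[key_max]['count']
--     ]
--     return maxList
-- ===== SOURCE B (Python) =====
-- def find_max_letter_count(analysis_dict):
--     letters = analysis_dict['letters']
--     best = None
--     result = []
--     for key, info in letters.items():
--         c = info['count']
--         if best is None or c > best:
--             best = c
--             result = [key]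
--         elif c == best:
--             result.append(key)
--     return result
-- ===== Notes on version B (the rewrite author's own statement) =====
-- stated objective: faster
-- what changed: Replaces A's max-with-key pass plus a second filtering comprehension (each re-looking every count up by key) with one pass over letters.items() that keeps the running best count and the list of keys attaining it.
import Mathlib
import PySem

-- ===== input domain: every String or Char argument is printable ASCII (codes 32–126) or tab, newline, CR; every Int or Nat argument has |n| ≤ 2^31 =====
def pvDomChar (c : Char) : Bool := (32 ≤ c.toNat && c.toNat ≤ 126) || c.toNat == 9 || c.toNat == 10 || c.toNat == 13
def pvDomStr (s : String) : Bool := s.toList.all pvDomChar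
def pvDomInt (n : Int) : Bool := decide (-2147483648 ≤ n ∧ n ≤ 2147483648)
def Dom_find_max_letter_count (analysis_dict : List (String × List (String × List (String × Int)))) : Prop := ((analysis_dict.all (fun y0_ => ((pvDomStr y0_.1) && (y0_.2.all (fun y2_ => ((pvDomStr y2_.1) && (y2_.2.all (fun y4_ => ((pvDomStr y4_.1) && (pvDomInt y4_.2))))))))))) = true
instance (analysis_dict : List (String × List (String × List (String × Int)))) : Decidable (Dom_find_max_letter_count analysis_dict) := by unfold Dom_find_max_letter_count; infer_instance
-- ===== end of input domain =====

-- B replaces A's max-with-key pass plus a second filtering comprehension (each re-looking counts up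
-- by key) with a single pass over letters.items() keeping the running best count and its key list.


-- ===== PORT A =====
-- letters[k]['count'] as A evaluates it (a fresh lookup by key); defaults are only reached outside Pre_,
-- where the Python raises KeyError.
def pvCnt (letters : List (String × List (String × Int))) (k : String) : Int :=
  (PySem.Dict.get? (PySem.Dict.mk (((PySem.Dict.get? (PySem.Dict.mk letters) k).getD []))) "count").getD 0

def find_max_letter_count (analysis_dict : List (String × List (String × List (String × Int)))) : List String :=
  let letters := (PySem.Dict.get? (PySem.Dict.mk analysis_dict) "letters").getD []
  let ks := PySem.Dict.keys (PySem.Dict.mk letters)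
  match PySem.List.max? ks (fun k => pvCnt letters k) with
  | none => []          -- unreachable under Pre_: Python's max raises ValueError on an empty dict
  | some key_max => ks.filter (fun x => pvCnt letters x == pvCnt letters key_max)

-- ===== PORT B =====
-- the loop body of Source B: state = (best, result)
def pvStep (st : Option Int × List String) (p : String × List (String × Int)) : Option Int × List String :=
  let c := (PySem.Dict.get? (PySem.Dict.mk p.2) "count").getD 0
  match st.1 with
  | none => (some c, [p.1])
  | some b => if b < c then (some c, [p.1]) else if c = b then (some b, st.2 ++ [p.1]) else st

def find_max_letter_count_alt (analysis_dict : List (String × List (String × List (String × Int)))) : List String :=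
  let letters := (PySem.Dict.get? (PySem.Dict.mk analysis_dict) "letters").getD []
  ((PySem.Dict.items (PySem.Dict.mk letters)).foldl pvStep (none, [])).2

-- ===== PRECONDITION & SPEC =====
-- Pre_ excludes exactly the inputs where the Python A raises: a missing 'letters' key (KeyError), an
-- empty letters dict (ValueError from max), or a letter entry without a 'count' key (KeyError); it also
-- restricts to letter lists with distinct keys, the only association lists that represent a Python dict.
def Pre_find_max_letter_count (analysis_dict : List (String × List (String × List (String × Int)))) : Prop :=
  (PySem.Dict.get? (PySem.Dict.mk analysis_dict) "letters").isSome ∧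
  (let L := (PySem.Dict.get? (PySem.Dict.mk analysis_dict) "letters").getD []
   L ≠ [] ∧ (L.map Prod.fst).Nodup ∧ ∀ p ∈ L, (PySem.Dict.get? (PySem.Dict.mk p.2) "count").isSome)
instance (analysis_dict : List (String × List (String × List (String × Int)))) : Decidable (Pre_find_max_letter_count analysis_dict) := by unfold Pre_find_max_letter_count; infer_instance

def pvWitness_find_max_letter_count : (List (String × List (String × List (String × Int)))) :=
  [("letters", [("a", [("count", 2)]), ("b", [("count", 2)]), ("c", [("count", 1)])])]

def Spec_find_max_letter_count (analysis_dict : List (String × List (String × List (String × Int)))) (out : List String) : Prop := out = find_max_letter_count_alt analysis_dict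
instance (analysis_dict : List (String × List (String × List (String × Int)))) (out : List String) : Decidable (Spec_find_max_letter_count analysis_dict out) := by unfold Spec_find_max_letter_count; infer_instance

-- ===== CLAIM (what is proved, stated in full; the proofs are below) =====
def Claim_equal_find_max_letter_count : Prop := ∀ (analysis_dict : List (String × List (String × List (String × Int)))), Dom_find_max_letter_count analysis_dict → Pre_find_max_letter_count analysis_dict → Spec_find_max_letter_count analysis_dict (find_max_letter_count analysis_dict)

-- ===== LEMMAS AND PROOFS =====
-- the per-item count, and the running maximum of counts
def pvF (p : String × List (String × Int)) : Int :=
  (PySem.Dict.get? (PySem.Dict.mk p.2) "count").getD 0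
def pvMax (b : Int) (L : List (String × List (String × Int))) : Int :=
  L.foldl (fun m p => max m (pvF p)) b

theorem pvFold_spec (L : List (String × List (String × Int))) (b : Int) (r : List String) :
    L.foldl pvStep (some b, r) =
      (some (pvMax b L),
       (if pvMax b L = b then r else []) ++ (L.filter (fun p => pvF p == pvMax b L)).map Prod.fst) := by
  induction L generalizing b r with
  | nil => simp [pvMax]
  | cons p T ih =>
    have hM : pvMax b (p :: T) = pvMax (max b (pvF p)) T := rfl
    have hunf : ∀ st : Option Int × List String, pvStep st p =
        (let c := pvF p
         match st.1 with
         | none => (some c, [p.1])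
         | some b => if b < c then (some c, [p.1]) else if c = b then (some b, st.2 ++ [p.1]) else st) := fun _ => rfl
    by_cases hlt : b < pvF p
    · have hmx : max b (pvF p) = pvF p := by omega
      have hcM : pvF p ≤ pvMax (pvF p) T := (PySem.List.le_foldl_max_int T pvF (pvF p)).1
      have hstep : pvStep (some b, r) p = (some (pvF p), [p.1]) := by
        rw [hunf]; simp [hlt]
      rw [List.foldl_cons, hstep, ih, hM, hmx]
      have hMb : pvMax (pvF p) T ≠ b := by omega
      rw [if_neg hMb]
      generalize pvMax (pvF p) T = M at *
      by_cases hc : pvF p = M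
      · simp [hc]
      · simp [hc, Ne.symm hc]
    · have hmx : max b (pvF p) = b := by omega
      rw [List.foldl_cons]
      by_cases heq : pvF p = b
      · have hstep : pvStep (some b, r) p = (some b, r ++ [p.1]) := by
          rw [hunf]; simp [heq]
        rw [hstep, ih, hM, hmx]
        have hbM : b ≤ pvMax b T := (PySem.List.le_foldl_max_int T pvF b).1
        generalize pvMax b T = M at *
        by_cases hMb : M = b
        · simp [hMb, heq]
        · have hne : pvF p ≠ M := by omega
          simp [hMb, hne]
      · have hcb : pvF p < b := by omega
        have hstep : pvStep (some b, r) p = (some b, r) := by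
          rw [hunf]; simp [hlt, heq]
        rw [hstep, ih, hM, hmx]
        have hbM : b ≤ pvMax b T := (PySem.List.le_foldl_max_int T pvF b).1
        generalize pvMax b T = M at *
        have hne : pvF p ≠ M := by omega
        simp [hne]

-- A's fresh lookup agrees with the item's own value on a duplicate-free dict
theorem pvCnt_eq_pvF (L : List (String × List (String × Int))) (hnd : (L.map Prod.fst).Nodup)
    (q : String × List (String × Int)) (hq : q ∈ L) : pvCnt L q.1 = pvF q := by
  have hkeys : (PySem.Dict.mk L).keys.Nodup := by
    simpa [PySem.Dict.keys_mk] using hnd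
  have hget : (PySem.Dict.mk L).get? q.1 = some q.2 :=
    PySem.Dict.get?_of_mem_items (PySem.Dict.mk L) (by exact hq) hkeys
  simp [pvCnt, pvF, hget]

theorem pvF_le_max (p q : String × List (String × Int)) (T : List (String × List (String × Int)))
    (hq : q ∈ p :: T) : pvF q ≤ pvMax (pvF p) T := by
  rcases List.mem_cons.1 hq with h | h
  · rw [h]; exact (PySem.List.le_foldl_max_int T pvF (pvF p)).1
  · exact (PySem.List.le_foldl_max_int T pvF (pvF p)).2 q h

theorem pvMax_attained (p : String × List (String × Int)) (T : List (String × List (String × Int))) :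
    ∃ q ∈ p :: T, pvF q = pvMax (pvF p) T := by
  have hmap : pvMax (pvF p) T = (T.map pvF).foldl max (pvF p) := by
    simp [pvMax, List.foldl_map]
  rcases PySem.List.foldl_max_mem (T.map pvF) (pvF p) with h | h
  · exact ⟨p, List.mem_cons_self, by rw [hmap, h]⟩
  · rcases List.mem_map.1 h with ⟨q, hq, hfq⟩
    exact ⟨q, List.mem_cons_of_mem _ hq, by rw [hmap, hfq]⟩

theorem pvMax_eq_cnt_max (p : String × List (String × Int)) (T : List (String × List (String × Int)))
    (hnd : (((p :: T)).map Prod.fst).Nodup) (km : String)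
    (hkm : PySem.List.max? ((p :: T).map Prod.fst) (fun k => pvCnt (p :: T) k) = some km) :
    pvCnt (p :: T) km = pvMax (pvF p) T := by
  rcases List.mem_map.1 (PySem.List.max?_mem hkm) with ⟨qm, hqm, hq1⟩
  have hcnt : pvCnt (p :: T) km = pvF qm := by rw [← hq1]; exact pvCnt_eq_pvF _ hnd _ hqm
  have hle : pvCnt (p :: T) km ≤ pvMax (pvF p) T := by
    rw [hcnt]; exact pvF_le_max p qm T hqm
  rcases pvMax_attained p T with ⟨q, hq, hfq⟩
  have hge : pvMax (pvF p) T ≤ pvCnt (p :: T) km := by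
    rw [← hfq, ← pvCnt_eq_pvF _ hnd _ hq]
    exact PySem.List.max?_isMax hkm q.1 (List.mem_map_of_mem hq)
  omega

-- ===== VERDICT (by name: the statement is the Claim_ definition above) =====
theorem find_max_letter_count_spec : Claim_equal_find_max_letter_count := by
  intro ad _ hpre
  unfold Spec_find_max_letter_count
  obtain ⟨hsome, hrest⟩ := hpre
  obtain ⟨L, hL⟩ := Option.isSome_iff_exists.1 hsome
  simp only [hL, Option.getD_some] at hrest
  obtain ⟨hne, hnd, -⟩ := hrest
  unfold find_max_letter_count find_max_letter_count_alt
  simp only [hL, Option.getD_some]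
  cases L with
  | nil => exact absurd rfl hne
  | cons p T =>
    have hks : PySem.Dict.keys (PySem.Dict.mk (p :: T)) = (p :: T).map Prod.fst :=
      PySem.Dict.keys_mk _
    have hnd' : ((p :: T).map Prod.fst).Nodup := hnd
    rw [hks]
    cases hmax : PySem.List.max? ((p :: T).map Prod.fst) (fun k => pvCnt (p :: T) k) with
    | none => exact absurd ((PySem.List.max?_eq_none_iff _ _).1 hmax) (by simp)
    | some km =>
      have hM : pvCnt (p :: T) km = pvMax (pvF p) T := pvMax_eq_cnt_max p T hnd' km hmax
      have hstep0 : pvStep (none, []) p = (some (pvF p), [p.1]) := rfl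
      dsimp only
      rw [List.foldl_cons, hstep0, pvFold_spec]
      simp only [hM]
      rw [List.filter_map]
      have hcong : List.filter ((fun x => pvCnt (p :: T) x == pvMax (pvF p) T) ∘ Prod.fst) (p :: T)
          = List.filter (fun q => pvF q == pvMax (pvF p) T) (p :: T) := by
        apply List.filter_congr
        intro q hq
        simp [Function.comp, pvCnt_eq_pvF _ hnd' q hq]
      rw [hcong]
      generalize pvMax (pvF p) T = M at *
      by_cases hc : pvF p = M
      · simp [List.filter_cons, hc]
      · simp [List.filter_cons, hc, Ne.symm hc]
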